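-- pv_equiv track=rewrite | github.com/Ombhavsar218/redscan | rescanai/scan_controller.py | _get_port_scan_messages
-- ===== SOURCE A (Python) =====
-- from typing import Dict, List, Any, Optional, Callable
--
-- def _get_port_scan_messages(step_count: int) -> List[str]:
--     """Generate different port scanning messages"""
--     base_messages = [
--         "Initializing port scanner...",
--         "Checking port 80 (HTTP)...",
--         "Checking port 443 (HTTPS)...",
--         "Checking port 8080 (HTTP-Alt)...",
--         "Checking port 8443 (HTTPS-Alt)...",
--         "Checking port 3000 (Development)...",
--         "Checking port 5000 (Flask/Dev)...",
--         "Checking port 8000 (Django/Alt)...",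
--         "Performing service detection...",
--         "Analyzing open ports...",
--         "Checking for common services...",
--         "Detecting web servers...",
--         "Scanning for database ports...",
--         "Looking for SSH services...",
--         "Checking FTP services...",
--         "Analyzing port responses...",
--         "Performing banner grabbing...",
--         "Identifying service versions...",
--         "Checking for secure protocols...",
--         "Analyzing port accessibility...",
--         "Detecting service fingerprints...",
--         "Checking for default ports...",
--         "Scanning development ports...",
--         "Looking for API endpoints...",
--         "Checking proxy services...",
--         "Analyzing network services...",
--         "Detecting application servers...",
--         "Checking for admin panels...",
--         "Scanning for monitoring tools...",
--         "Finalizing port analysis..."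
--     ]
--
--     # Return exactly step_count messages, cycling if needed
--     messages = []
--     for i in range(step_count):
--         messages.append(base_messages[i % len(base_messages)])
--     return messages
-- ===== SOURCE B (Python) =====
-- from typing import List
--
-- def _get_port_scan_messages(step_count: int) -> List[str]:
--     """Generate different port scanning messages"""
--     base_messages = [
--         "Initializing port scanner...",
--         "Checking port 80 (HTTP)...",
--         "Checking port 443 (HTTPS)...",
--         "Checking port 8080 (HTTP-Alt)...",
--         "Checking port 8443 (HTTPS-Alt)...",
--         "Checking port 3000 (Development)...",
--         "Checking port 5000 (Flask/Dev)...",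
--         "Checking port 8000 (Django/Alt)...",
--         "Performing service detection...",
--         "Analyzing open ports...",
--         "Checking for common services...",
--         "Detecting web servers...",
--         "Scanning for database ports...",
--         "Looking for SSH services...",
--         "Checking FTP services...",
--         "Analyzing port responses...",
--         "Performing banner grabbing...",
--         "Identifying service versions...",
--         "Checking for secure protocols...",
--         "Analyzing port accessibility...",
--         "Detecting service fingerprints...",
--         "Checking for default ports...",
--         "Scanning development ports...",
--         "Looking for API endpoints...",
--         "Checking proxy services...",
--         "Analyzing network services...",
--         "Detecting application servers...",
--         "Checking for admin panels...",
--         "Scanning for monitoring tools...",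
--         "Finalizing port analysis..."
--     ]
--     if step_count <= 0:
--         return []
--     reps = step_count // len(base_messages) + 1
--     return (base_messages * reps)[:step_count]
-- ===== Notes on version B (the rewrite author's own statement) =====
-- stated objective: simpler
-- what changed: Replaced the per-element modulo-indexed append loop by whole-list replication (base_messages * reps) followed by a single slice [:step_count], with an early return for non-positive counts.
import Mathlib
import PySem

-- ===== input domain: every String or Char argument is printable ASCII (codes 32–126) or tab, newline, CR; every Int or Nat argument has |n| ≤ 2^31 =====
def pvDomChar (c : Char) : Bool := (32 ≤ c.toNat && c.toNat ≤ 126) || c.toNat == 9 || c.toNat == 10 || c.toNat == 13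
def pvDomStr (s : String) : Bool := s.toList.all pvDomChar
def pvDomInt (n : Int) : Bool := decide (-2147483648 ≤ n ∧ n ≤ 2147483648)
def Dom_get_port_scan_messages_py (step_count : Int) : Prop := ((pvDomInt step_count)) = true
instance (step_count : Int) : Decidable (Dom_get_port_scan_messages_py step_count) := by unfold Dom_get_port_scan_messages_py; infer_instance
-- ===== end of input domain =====

-- B replaces A's modulo-indexed append loop by whole-list replication plus one slice (objective: simpler).

-- the fixed message list, shared data of both programs
def pvBase : List String := [
  "Initializing port scanner...",
  "Checking port 80 (HTTP)...",
  "Checking port 443 (HTTPS)...",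
  "Checking port 8080 (HTTP-Alt)...",
  "Checking port 8443 (HTTPS-Alt)...",
  "Checking port 3000 (Development)...",
  "Checking port 5000 (Flask/Dev)...",
  "Checking port 8000 (Django/Alt)...",
  "Performing service detection...",
  "Analyzing open ports...",
  "Checking for common services...",
  "Detecting web servers...",
  "Scanning for database ports...",
  "Looking for SSH services...",
  "Checking FTP services...",
  "Analyzing port responses...",
  "Performing banner grabbing...",
  "Identifying service versions...",
  "Checking for secure protocols...",
  "Analyzing port accessibility...",
  "Detecting service fingerprints...",
  "Checking for default ports...",
  "Scanning development ports...",
  "Looking for API endpoints...",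
  "Checking proxy services...",
  "Analyzing network services...",
  "Detecting application servers...",
  "Checking for admin panels...",
  "Scanning for monitoring tools...",
  "Finalizing port analysis..."]

-- ===== PORT A =====
-- for i in range(step_count): messages.append(base_messages[i % len(base_messages)])
def get_port_scan_messages_py (step_count : Int) : List String :=
  (PySem.List.pyRange 0 step_count 1).foldl
    (fun messages i =>
      messages ++ [PySem.List.pyGetD pvBase (PySem.Int.mod i (pvBase.length : Int)) ""]) []

-- ===== PORT B =====
-- if step_count <= 0: return []; reps = step_count // 30 + 1; return (base * reps)[:step_count]
def get_port_scan_messages_py_alt (step_count : Int) : List String :=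
  if step_count ≤ 0 then []
  else
    let reps := PySem.Int.floordiv step_count (pvBase.length : Int) + 1
    PySem.List.slice ((List.replicate reps.toNat pvBase).flatten) none (some step_count)

-- ===== PRECONDITION & SPEC =====
def Spec_get_port_scan_messages_py (step_count : Int) (out : List String) : Prop := out = get_port_scan_messages_py_alt step_count
instance (step_count : Int) (out : List String) : Decidable (Spec_get_port_scan_messages_py step_count out) := by unfold Spec_get_port_scan_messages_py; infer_instance

-- ===== CLAIM (what is proved, stated in full; the proofs are below) =====
def Claim_equal_get_port_scan_messages_py : Prop := ∀ (step_count : Int), Dom_get_port_scan_messages_py step_count → Spec_get_port_scan_messages_py step_count (get_port_scan_messages_py step_count)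

-- ===== LEMMAS AND PROOFS =====

theorem pvBase_length : pvBase.length = 30 := by rfl

-- element i of m concatenated copies of pvBase is element i % 30 of pvBase
theorem pv_flat_get (m i : Nat) (h : i < m * 30) :
    ((List.replicate m pvBase).flatten)[i]? = pvBase[i % 30]? := by
  induction m generalizing i with
  | zero => omega
  | succ k ih =>
    rw [List.replicate_succ, List.flatten_cons]
    by_cases hi : i < 30
    · rw [List.getElem?_append_left (by rw [pvBase_length]; omega)]
      congr 1; omega
    · rw [List.getElem?_append_right (by rw [pvBase_length]; omega), pvBase_length]
      rw [ih (i - 30) (by omega)]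
      congr 1; omega

-- the cycled map equals a take of the replicated flat list
theorem pv_map_eq_take (n : Nat) :
    (List.range n).map (fun k => pvBase.getD (k % 30) "") =
      ((List.replicate (n / 30 + 1) pvBase).flatten).take n := by
  have hlen : ((List.replicate (n / 30 + 1) pvBase).flatten).length = (n / 30 + 1) * 30 := by
    simp only [List.length_flatten, List.map_replicate, List.sum_replicate, smul_eq_mul,
      pvBase_length]
  apply List.ext_getElem?
  intro i
  by_cases hi : i < n
  · rw [List.getElem?_take, if_pos hi, pv_flat_get _ i (by omega),
      List.getElem?_map, List.getElem?_range hi]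
    have h30 : i % 30 < pvBase.length := by rw [pvBase_length]; omega
    simp [List.getD, List.getElem?_eq_getElem h30]
  · rw [List.getElem?_take, if_neg hi, List.getElem?_map,
      List.getElem?_eq_none (by simp; omega)]
    rfl

-- ===== VERDICT (by name: the statement is the Claim_ definition above) =====
theorem get_port_scan_messages_py_spec : Claim_equal_get_port_scan_messages_py := by
  intro step_count _
  unfold Spec_get_port_scan_messages_py get_port_scan_messages_py get_port_scan_messages_py_alt
  rw [PySem.List.foldl_append_singleton_eq_map]
  by_cases hle : step_count ≤ 0
  · rw [if_pos hle, PySem.List.pyRange_one_eq_nil hle]; rfl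
  · rw [if_neg hle]
    have hn : step_count = ((step_count.toNat : Nat) : Int) := by omega
    rw [PySem.List.slice_to _ (by omega)]
    rw [pvBase_length]
    conv_lhs => rw [hn]
    rw [PySem.List.pyRange_one, List.map_map]
    have hreps : (PySem.Int.floordiv step_count ((30 : Nat) : Int) + 1).toNat = step_count.toNat / 30 + 1 := by
      conv_lhs => rw [hn]
      rw [PySem.Int.floordiv_natCast]
      omega
    rw [hreps]
    have := pv_map_eq_take step_count.toNat
    rw [← this]
    apply List.map_congr_left
    intro k hk
    simp only [Function.comp_apply, zero_add]
    rw [PySem.Int.mod_natCast, PySem.List.pyGetD_natCast]
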